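-- pv_equiv track=rewrite | github.com/xaviermathew/Xpression | xpression/parser.py | split_brackets
-- ===== SOURCE A (Python) =====
-- def split_brackets(token):
--     word_buffer = []
--     for c in token:
--         if c == '(':
--             yield c
--         elif c == ')':
--             if word_buffer:
--                 yield ''.join(word_buffer)
--                 word_buffer = []
--             yield c
--         else:
--             word_buffer.append(c)
--     if word_buffer:
--         yield ''.join(word_buffer)
-- ===== SOURCE B (Python) =====
-- def split_brackets(token):
--     segments = token.split(')')
--     last = len(segments) - 1
--     for i, seg in enumerate(segments):
--         for c in seg:
--             if c == '(':
--                 yield c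
--         word = ''.join(c for c in seg if c != '(')
--         if word:
--             yield word
--         if i != last:
--             yield ')'
-- ===== Notes on version B (the rewrite author's own statement) =====
-- stated objective: alternative
-- what changed: Replaces A's single stateful streaming pass with a mutable word buffer by a split-on-')' pass over whole segments: each segment yields its '(' chars, then its non-paren chars joined as one word, then ')' for every segment but the last.
import Mathlib
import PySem

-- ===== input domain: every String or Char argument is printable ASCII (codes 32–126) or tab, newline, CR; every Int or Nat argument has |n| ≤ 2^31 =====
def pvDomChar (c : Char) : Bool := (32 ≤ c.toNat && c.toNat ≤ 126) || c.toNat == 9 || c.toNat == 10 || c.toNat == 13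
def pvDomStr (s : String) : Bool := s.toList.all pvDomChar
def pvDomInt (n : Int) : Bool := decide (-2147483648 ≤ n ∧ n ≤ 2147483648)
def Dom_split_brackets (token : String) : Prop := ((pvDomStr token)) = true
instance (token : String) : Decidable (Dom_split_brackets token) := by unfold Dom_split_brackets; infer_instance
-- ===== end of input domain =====

-- B replaces A's single stateful streaming pass (mutable word buffer flushed at ')'/end)
-- by splitting the token on ')' and emitting each segment's parens and merged word; alternative decomposition, same cost.


-- ===== PORT A =====
-- one step of A's for-loop: state = (yielded output so far, word_buffer)
def stepA (st : List String × List Char) (c : Char) : List String × List Char :=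
  if c = '(' then (st.1 ++ ["("], st.2)
  else if c = ')' then
    ((if st.2 ≠ [] then st.1 ++ [String.ofList st.2] else st.1) ++ [")"], [])
  else (st.1, st.2 ++ [c])

def split_brackets (token : String) : List String :=
  let fin := token.toList.foldl stepA ([], [])
  if fin.2 ≠ [] then fin.1 ++ [String.ofList fin.2] else fin.1

-- ===== PORT B =====
-- body of B's for-loop over enumerate(segments): yield '(' per '(' char, the joined non-'(' chars if non-empty, and ')' unless last
def stepB (last : Int) (acc : List String) (p : Int × List Char) : List String :=
  let acc1 := p.2.foldl (fun a c => if c = '(' then a ++ ["("] else a) acc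
  let word := p.2.filter (fun c => c ≠ '(')
  let acc2 := if word ≠ [] then acc1 ++ [String.ofList word] else acc1
  if p.1 ≠ last then acc2 ++ [")"] else acc2

def split_brackets_alt (token : String) : List String :=
  let segments := PySem.Chars.splitOn token.toList [')']
  let last : Int := (segments.length : Int) - 1
  (PySem.List.enumerate segments).foldl (stepB last) []

-- ===== PRECONDITION & SPEC =====
def Spec_split_brackets (token : String) (out : List String) : Prop := out = split_brackets_alt token
instance (token : String) (out : List String) : Decidable (Spec_split_brackets token out) := by unfold Spec_split_brackets; infer_instance

-- ===== CLAIM (what is proved, stated in full; the proofs are below) =====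
def Claim_equal_split_brackets : Prop := ∀ (token : String), Dom_split_brackets token → Spec_split_brackets token (split_brackets token)

-- ===== LEMMAS AND PROOFS =====

-- simple recursive characterisation of splitting a char list on ')'
def mySplit : List Char → List (List Char)
  | [] => [[]]
  | c :: cs => if c = ')' then [] :: mySplit cs
               else match mySplit cs with
                    | [] => [[c]]
                    | s :: ss => (c :: s) :: ss

theorem mySplit_ne_nil (cs : List Char) : mySplit cs ≠ [] := by
  induction cs with
  | nil => simp [mySplit]
  | cons c cs ih =>
    simp only [mySplit]
    split
    · simp
    · cases h : mySplit cs <;> simp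

theorem splitOn_go_eq : ∀ (fuel : Nat) (cs cur : List Char) (acc : List (List Char)),
    cs.length ≤ fuel →
    PySem.Chars.splitOn.go [')'] fuel cs cur acc
      = acc.reverse ++ List.modifyHead (fun s => cur.reverse ++ s) (mySplit cs) := by
  intro fuel
  induction fuel with
  | zero =>
    intro cs cur acc h
    have : cs = [] := by cases cs <;> simp_all
    subst this
    simp [PySem.Chars.splitOn.go, mySplit]
  | succ fuel ih =>
    intro cs cur acc h
    cases cs with
    | nil => simp [PySem.Chars.splitOn.go, mySplit]
    | cons c rest =>
      by_cases hc : c = ')'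
      · subst hc
        rw [show PySem.Chars.splitOn.go [')'] (fuel+1) (')'::rest) cur acc
              = PySem.Chars.splitOn.go [')'] fuel rest [] (cur.reverse :: acc) by
            simp [PySem.Chars.splitOn.go, List.isPrefixOf]]
        rw [ih rest [] (cur.reverse :: acc) (by simpa using Nat.le_of_succ_le_succ h)]
        simp only [mySplit, if_true]
        cases mySplit rest <;> simp
      · rw [show PySem.Chars.splitOn.go [')'] (fuel+1) (c::rest) cur acc
              = PySem.Chars.splitOn.go [')'] fuel rest (c :: cur) acc by
            simp [PySem.Chars.splitOn.go, List.isPrefixOf, Ne.symm hc]]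
        rw [ih rest (c :: cur) acc (by simpa using Nat.le_of_succ_le_succ h)]
        simp only [mySplit, if_neg hc]
        cases h' : mySplit rest with
        | nil => exact absurd h' (mySplit_ne_nil rest)
        | cons s ss => simp

theorem splitOn_eq_mySplit (cs : List Char) :
    PySem.Chars.splitOn cs [')'] = mySplit cs := by
  rw [show PySem.Chars.splitOn cs [')'] = PySem.Chars.splitOn.go [')'] (cs.length + 1) cs [] []
        from rfl]
  rw [splitOn_go_eq (cs.length + 1) cs [] [] (Nat.le_succ _)]
  cases h : mySplit cs with
  | nil => exact absurd h (mySplit_ne_nil cs)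
  | cons s ss => simp

-- what B emits for one segment
def emitSeg (s : List Char) : List String :=
  (s.filter (fun c => c = '(')).map (fun _ => "(")
    ++ (if s.filter (fun c => c ≠ '(') ≠ [] then [String.ofList (s.filter (fun c => c ≠ '('))] else [])

-- B's whole output as a function of the segment list (last segment gets no ')')
def fB : List (List Char) → List String
  | [] => []
  | [s] => emitSeg s
  | s :: s' :: rest => emitSeg s ++ ")" :: fB (s' :: rest)

theorem inner_foldl (s : List Char) (acc : List String) :
    s.foldl (fun a c => if c = '(' then a ++ ["("] else a) acc
      = acc ++ (s.filter (fun c => c = '(')).map (fun _ => "(") := by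
  induction s generalizing acc with
  | nil => simp
  | cons c s ih =>
    by_cases hc : c = '(' <;> simp [hc, ih, List.filter]

theorem stepB_eq (last i : Int) (acc : List String) (s : List Char) :
    stepB last acc (i, s)
      = acc ++ emitSeg s ++ (if i ≠ last then [")"] else []) := by
  simp only [stepB, emitSeg]
  rw [inner_foldl]
  split_ifs <;> simp

theorem enumerate_foldl : ∀ (segs : List (List Char)) (start last : Int) (acc : List String),
    segs ≠ [] → last = start + segs.length - 1 →
    (PySem.List.enumerate segs start).foldl (stepB last) acc = acc ++ fB segs := by
  intro segs
  induction segs with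
  | nil => intro _ _ _ h _; exact absurd rfl h
  | cons s rest ih =>
    intro start last acc _ hlast
    rw [show PySem.List.enumerate (s :: rest) start
          = (start, s) :: PySem.List.enumerate rest (start + 1) by
        simp [PySem.List.enumerate]]
    rw [List.foldl_cons, stepB_eq]
    cases rest with
    | nil =>
      have hs : ¬ start ≠ last := by simp at hlast; omega
      rw [if_neg hs]
      simp [PySem.List.enumerate, fB]
    | cons s' rest' =>
      have hne2 : start ≠ last := by simp at hlast; omega
      rw [if_pos hne2,
          ih (start + 1) last _ (by simp) (by simp at hlast ⊢; omega)]
      simp [fB]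

-- A's whole output as a function of the remaining chars and the buffer
def finA (cs buf : List Char) : List String :=
  let f := cs.foldl stepA ([], buf)
  if f.2 ≠ [] then f.1 ++ [String.ofList f.2] else f.1

theorem foldl_stepA_prefix : ∀ (cs : List Char) (out : List String) (buf : List Char),
    cs.foldl stepA (out, buf)
      = (out ++ (cs.foldl stepA ([], buf)).1, (cs.foldl stepA ([], buf)).2) := by
  intro cs
  induction cs with
  | nil => simp
  | cons c cs ih =>
    intro out buf
    simp only [List.foldl_cons]
    by_cases h1 : c = '('
    · rw [show stepA (out, buf) c = (out ++ ["("], buf) by simp [stepA, h1],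
          show stepA (([] : List String), buf) c = ([("(" : String)], buf) by simp [stepA, h1],
          ih, ih ["("] buf]
      simp
    · by_cases h2 : c = ')'
      · rw [show stepA (out, buf) c
              = ((if buf ≠ [] then out ++ [String.ofList buf] else out) ++ [")"], []) by
            simp [stepA, h2],
            show stepA (([] : List String), buf) c
              = ((if buf ≠ [] then [String.ofList buf] else []) ++ [")"], []) by
            simp [stepA, h2],
            ih ((if buf ≠ [] then out ++ [String.ofList buf] else out) ++ [")"]) [],
            ih ((if buf ≠ [] then [String.ofList buf] else []) ++ [")"]) []]
        split_ifs <;> simp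
      · rw [show stepA (out, buf) c = (out, buf ++ [c]) by simp [stepA, h1, h2],
            show stepA (([] : List String), buf) c = ([], buf ++ [c]) by simp [stepA, h1, h2]]
        exact ih out (buf ++ [c])

theorem filter_open_nil (buf : List Char) (h : '(' ∉ buf) :
    List.filter (fun c => c = '(') buf = [] := by
  rw [List.filter_eq_nil_iff]
  intro a ha
  simp
  exact fun e => h (e ▸ ha)

theorem filter_word_self (buf : List Char) (h : '(' ∉ buf) :
    List.filter (fun c => c ≠ '(') buf = buf := by
  rw [List.filter_eq_self]
  intro a ha
  simp
  exact fun e => h (e ▸ ha)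

theorem emitSeg_of_clean (buf : List Char) (h : '(' ∉ buf) :
    emitSeg buf = if buf ≠ [] then [String.ofList buf] else [] := by
  simp only [emitSeg]
  rw [filter_open_nil buf h, filter_word_self buf h]
  simp

theorem emitSeg_open_cons (buf h' : List Char) (hbuf : '(' ∉ buf) :
    emitSeg (buf ++ '(' :: h') = "(" :: emitSeg (buf ++ h') := by
  simp only [emitSeg, List.filter_append]
  rw [filter_open_nil buf hbuf, filter_word_self buf hbuf]
  simp

theorem mySplit_head : ∀ (cs : List Char), ∃ h t, mySplit cs = h :: t := by
  intro cs
  cases hm : mySplit cs with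
  | nil => exact absurd hm (mySplit_ne_nil cs)
  | cons a b => exact ⟨a, b, rfl⟩

set_option maxRecDepth 8192 in
theorem key : ∀ (cs buf : List Char), '(' ∉ buf →
    finA cs buf = fB (List.modifyHead (fun s => buf ++ s) (mySplit cs)) := by
  intro cs
  induction cs with
  | nil =>
    intro buf hbuf
    simp only [finA, List.foldl_nil, mySplit, List.modifyHead]
    rw [show fB [buf ++ []] = emitSeg (buf ++ []) from rfl]
    simp [emitSeg_of_clean buf hbuf]
  | cons c cs ih =>
    intro buf hbuf
    obtain ⟨h, t, hh⟩ := mySplit_head cs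
    by_cases h1 : c = '('
    · subst h1
      have lhs : finA ('(' :: cs) buf = "(" :: finA cs buf := by
        simp only [finA, List.foldl_cons,
          show stepA (([] : List String), buf) '(' = (["("], buf) by simp [stepA],
          foldl_stepA_prefix cs ["("] buf]
        split <;> simp
      rw [lhs, ih buf hbuf,
          show mySplit ('(' :: cs) = ('(' :: h) :: t by simp [mySplit, hh], hh]
      simp only [List.modifyHead]
      have ec := emitSeg_open_cons buf h hbuf
      cases t with
      | nil => simp [fB, ec]
      | cons t1 t2 => simp [fB, ec]
    · by_cases h2 : c = ')'
      · subst h2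
        have lhs : finA (')' :: cs) buf
            = (if buf ≠ [] then [String.ofList buf] else []) ++ ")" :: finA cs [] := by
          simp only [finA, List.foldl_cons,
            show stepA (([] : List String), buf) ')'
                = ((if buf ≠ [] then [String.ofList buf] else []) ++ [")"], []) by simp [stepA],
            foldl_stepA_prefix cs ((if buf ≠ [] then [String.ofList buf] else []) ++ [")"]) []]
          split <;> simp
        rw [lhs, ih [] (by simp),
            show mySplit (')' :: cs) = [] :: mySplit cs by simp [mySplit],
            show List.modifyHead (fun s => buf ++ s) ([] :: mySplit cs)
              = buf :: mySplit cs by simp,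
            show List.modifyHead (fun s => ([] : List Char) ++ s) (mySplit cs)
              = mySplit cs by cases mySplit cs <;> simp,
            hh,
            show fB (buf :: h :: t) = emitSeg buf ++ ")" :: fB (h :: t) from rfl,
            emitSeg_of_clean buf hbuf]
      · have lhs : finA (c :: cs) buf = finA cs (buf ++ [c]) := by
          simp only [finA, List.foldl_cons,
            show stepA (([] : List String), buf) c = ([], buf ++ [c]) by simp [stepA, h1, h2]]
        rw [lhs, ih (buf ++ [c]) (by simp [hbuf]; exact fun e => h1 e.symm),
            show mySplit (c :: cs) = (c :: h) :: t by simp [mySplit, h2, hh], hh]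
        simp

-- ===== VERDICT (by name: the statement is the Claim_ definition above) =====
theorem split_brackets_spec : Claim_equal_split_brackets := by
  intro token _
  unfold Spec_split_brackets
  show split_brackets token = split_brackets_alt token
  have hA : split_brackets token = finA token.toList [] := rfl
  have hB : split_brackets_alt token = fB (mySplit token.toList) := by
    unfold split_brackets_alt
    rw [splitOn_eq_mySplit]
    exact enumerate_foldl (mySplit token.toList) 0 _ [] (mySplit_ne_nil _) (by omega)
  rw [hA, hB, key token.toList [] (by simp)]
  cases hm : mySplit token.toList with
  | nil => exact absurd hm (mySplit_ne_nil _)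
  | cons s ss => simp
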